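-- pv_equiv track=rewrite | github.com/llvm/llvm-project | llvm-ir-dataset-utils/llvm_ir_dataset_utils/tools/get_common_constants.py | combine_constant_histograms
-- ===== SOURCE A (Python) =====
-- def combine_constant_histograms(part_a, part_b):
--   result_histogram = {}
--   for constant in list(set(list(part_a.keys()) + list(part_b.keys()))):
--     if constant in part_b and constant in part_a:
--       result_histogram[constant] = part_a[constant] + part_b[constant]
--     elif constant in part_a:
--       result_histogram[constant] = part_a[constant]
--     elif constant in part_b:
--       result_histogram[constant] = part_b[constant]
--   return result_histogram
-- ===== SOURCE B (Python) =====
-- def combine_constant_histograms(part_a, part_b):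
--   result = dict(part_a)
--   for constant, value in part_b.items():
--     result[constant] = result.get(constant, 0) + value
--   return result
-- ===== Notes on version B (the rewrite author's own statement) =====
-- stated objective: simpler
-- what changed: Instead of building a set union of both key lists and dispatching on a three-way membership test per key, B copies part_a and makes one pass over part_b.items() adding each value with result.get(k, 0) + v.
import Mathlib
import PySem

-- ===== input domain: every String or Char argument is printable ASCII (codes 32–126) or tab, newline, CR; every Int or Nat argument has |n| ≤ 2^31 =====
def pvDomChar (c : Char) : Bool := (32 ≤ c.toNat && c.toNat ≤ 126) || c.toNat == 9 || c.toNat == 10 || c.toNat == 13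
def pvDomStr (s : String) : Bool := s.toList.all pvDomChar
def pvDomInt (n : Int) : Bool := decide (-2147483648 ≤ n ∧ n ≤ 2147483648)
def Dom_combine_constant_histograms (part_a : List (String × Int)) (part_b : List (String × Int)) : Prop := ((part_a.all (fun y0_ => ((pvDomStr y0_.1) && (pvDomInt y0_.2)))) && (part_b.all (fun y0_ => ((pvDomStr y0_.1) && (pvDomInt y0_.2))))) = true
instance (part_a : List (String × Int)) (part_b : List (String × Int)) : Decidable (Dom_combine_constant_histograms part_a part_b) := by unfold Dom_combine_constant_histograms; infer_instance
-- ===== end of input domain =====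

-- B replaces A's set-union-of-keys loop with three membership branches by a copy of
-- part_a followed by one additive pass over part_b (simpler decomposition, same cost).
-- The Python returns dicts (compared ignoring order); the ports agree on the items lists.

-- ===== PORT A =====
def combine_constant_histograms (part_a : List (String × Int)) (part_b : List (String × Int)) : List (String × Int) :=
  ((PySem.Set.ofList ((PySem.Dict.ofList part_a).keys ++ (PySem.Dict.ofList part_b).keys)).foldl
    (fun (r : PySem.Dict String Int) k =>
      if (PySem.Dict.ofList part_b).contains k && (PySem.Dict.ofList part_a).contains k then
        r.insert k ((PySem.Dict.ofList part_a).getD k 0 + (PySem.Dict.ofList part_b).getD k 0)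
      else if (PySem.Dict.ofList part_a).contains k then
        r.insert k ((PySem.Dict.ofList part_a).getD k 0)
      else if (PySem.Dict.ofList part_b).contains k then
        r.insert k ((PySem.Dict.ofList part_b).getD k 0)
      else r) PySem.Dict.empty).items

-- ===== PORT B =====
def combine_constant_histograms_alt (part_a : List (String × Int)) (part_b : List (String × Int)) : List (String × Int) :=
  ((PySem.Dict.ofList part_b).items.foldl
    (fun (r : PySem.Dict String Int) p => r.insert p.1 (r.getD p.1 0 + p.2))
    (PySem.Dict.ofList part_a)).items

-- ===== PRECONDITION & SPEC =====
def Spec_combine_constant_histograms (part_a : List (String × Int)) (part_b : List (String × Int)) (out : List (String × Int)) : Prop := out = combine_constant_histograms_alt part_a part_b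
instance (part_a : List (String × Int)) (part_b : List (String × Int)) (out : List (String × Int)) : Decidable (Spec_combine_constant_histograms part_a part_b out) := by unfold Spec_combine_constant_histograms; infer_instance

-- ===== CLAIM (what is proved, stated in full; the proofs are below) =====
def Claim_equal_combine_constant_histograms : Prop := ∀ (part_a : List (String × Int)) (part_b : List (String × Int)), Dom_combine_constant_histograms part_a part_b → Spec_combine_constant_histograms part_a part_b (combine_constant_histograms part_a part_b)

-- ===== LEMMAS AND PROOFS =====

/-- Total value contributed by entries of `l` whose key is `k`. -/
def mergeAdd (l : List (String × Int)) (k : String) : Int :=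
  ((l.filter (fun p => p.1 == k)).map Prod.snd).sum

lemma mergeAdd_nil (k : String) : mergeAdd [] k = 0 := rfl

lemma mergeAdd_cons_self (a : String × Int) (t : List (String × Int)) :
    mergeAdd (a :: t) a.1 = a.2 + mergeAdd t a.1 := by
  unfold mergeAdd; simp

lemma mergeAdd_cons_ne (a : String × Int) (t : List (String × Int)) (k : String)
    (h : a.1 ≠ k) : mergeAdd (a :: t) k = mergeAdd t k := by
  unfold mergeAdd; simp [h]

lemma mergeAdd_of_not_mem (l : List (String × Int)) (k : String)
    (h : k ∉ l.map Prod.fst) : mergeAdd l k = 0 := by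
  unfold mergeAdd
  have : l.filter (fun p => p.1 == k) = [] := by
    rw [List.filter_eq_nil_iff]
    intro p hp hpk
    exact h (List.mem_map.mpr ⟨p, hp, by simpa using hpk⟩)
  simp [this]

/-- On a duplicate-free association list, `mergeAdd` is the dict lookup (default 0). -/
lemma mergeAdd_eq_getD (l : List (String × Int)) (hl : (l.map Prod.fst).Nodup) (k : String) :
    mergeAdd l k = (PySem.Dict.mk l).getD k 0 := by
  induction l with
  | nil => simp [mergeAdd, PySem.Dict.getD_eq_get?_getD, PySem.Dict.get?]
  | cons a t ih =>
    have hnd : (t.map Prod.fst).Nodup := (List.nodup_cons.mp (by simpa using hl)).2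
    have hna : a.1 ∉ t.map Prod.fst := (List.nodup_cons.mp (by simpa using hl)).1
    rw [PySem.Dict.getD_eq_get?_getD, PySem.Dict.get?_mk_cons]
    by_cases hk : a.1 = k
    · subst hk
      rw [mergeAdd_cons_self, mergeAdd_of_not_mem t a.1 hna]
      simp
    · rw [mergeAdd_cons_ne a t k hk, ih hnd, PySem.Dict.getD_eq_get?_getD]
      simp [hk]

/-- B's loop: final lookup = initial lookup plus the contributions from `l`. -/
lemma getD_alt_fold (l : List (String × Int)) (d : PySem.Dict String Int) (k : String) :
    (l.foldl (fun r p => r.insert p.1 (r.getD p.1 0 + p.2)) d).getD k 0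
      = d.getD k 0 + mergeAdd l k := by
  induction l generalizing d with
  | nil => simp [mergeAdd_nil]
  | cons a t ih =>
    rw [List.foldl_cons, ih]
    by_cases hk : k = a.1
    · subst hk
      rw [mergeAdd_cons_self, PySem.Dict.getD_insert_self]
      ring
    · rw [mergeAdd_cons_ne a t k (fun h => hk h.symm), PySem.Dict.getD_insert]
      simp [hk]

/-- A loop inserting values that do not depend on the accumulator: final lookup. -/
lemma getD_const_fold (v : String → Int) (l : List String) (d : PySem.Dict String Int) (k : String) :
    (l.foldl (fun r x => r.insert x (v x)) d).getD k 0
      = if k ∈ l then v k else d.getD k 0 := by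
  induction l generalizing d with
  | nil => simp
  | cons a t ih =>
    rw [List.foldl_cons, ih]
    by_cases ht : k ∈ t
    · simp [ht]
    · rw [PySem.Dict.getD_insert]
      by_cases hk : k = a
      · simp [hk]
      · simp [hk]

theorem combine_constant_histograms_eq_alt (part_a part_b : List (String × Int)) :
    combine_constant_histograms part_a part_b = combine_constant_histograms_alt part_a part_b := by
  unfold combine_constant_histograms combine_constant_histograms_alt
  set da := PySem.Dict.ofList part_a with hda
  set db := PySem.Dict.ofList part_b with hdb
  have hnda : da.keys.Nodup := PySem.Dict.nodup_keys_ofList part_a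
  have hndb : db.keys.Nodup := PySem.Dict.nodup_keys_ofList part_b
  set L : List String := PySem.Set.ofList (da.keys ++ db.keys) with hL
  have hLnd : L.Nodup := PySem.Set.nodup_ofList _
  have hLmem : ∀ k, k ∈ L ↔ k ∈ da.keys ∨ k ∈ db.keys := by
    intro k; rw [hL, PySem.Set.mem_ofList, List.mem_append]
  set vA : String → Int := fun k =>
    if db.contains k && da.contains k then da.getD k 0 + db.getD k 0
    else if da.contains k then da.getD k 0
    else db.getD k 0 with hvA
  have hcongr :
      L.foldl (fun (r : PySem.Dict String Int) k =>
        if db.contains k && da.contains k then r.insert k (da.getD k 0 + db.getD k 0)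
        else if da.contains k then r.insert k (da.getD k 0)
        else if db.contains k then r.insert k (db.getD k 0)
        else r) PySem.Dict.empty
      = L.foldl (fun (r : PySem.Dict String Int) k => r.insert k (vA k)) PySem.Dict.empty := by
    apply PySem.List.foldl_congr_mem
    intro r k hk
    have hmem := (hLmem k).mp hk
    by_cases hb : db.contains k = true
    · by_cases ha : da.contains k = true
      · simp [hvA, ha, hb]
      · simp [hvA, ha, hb]
    · by_cases ha : da.contains k = true
      · simp [hvA, ha, hb]
      · exfalso
        rcases hmem with h | h
        · exact ha ((PySem.Dict.contains_iff_mem_keys da k).mpr h)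
        · exact hb ((PySem.Dict.contains_iff_mem_keys db k).mpr h)
  rw [hcongr]
  set FA := L.foldl (fun (r : PySem.Dict String Int) k => r.insert k (vA k)) PySem.Dict.empty with hFA
  set FB := db.items.foldl (fun (r : PySem.Dict String Int) p => r.insert p.1 (r.getD p.1 0 + p.2)) da with hFB
  have hkA : FA.keys = L := by
    rw [hFA, PySem.Dict.keys_foldl_insert]
    simp only [PySem.Dict.keys_empty]
    rw [PySem.Set.update_nil_left, hL, PySem.Set.ofList_ofList]
  have hkB : FB.keys = L := by
    rw [hFB, PySem.Dict.keys_foldl_insert_key (key := Prod.fst)]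
    have hmapfst : db.items.map Prod.fst = db.keys := rfl
    rw [hmapfst, hL, PySem.Set.ofList_append, PySem.Set.ofList_eq_self_of_nodup da.keys hnda]
  have hkAnd : FA.keys.Nodup := by rw [hkA]; exact hLnd
  have hkBnd : FB.keys.Nodup := by rw [hkB]; exact hLnd
  have hval : ∀ k ∈ L, FA.getD k 0 = FB.getD k 0 := by
    intro k hk
    have hmem := (hLmem k).mp hk
    rw [hFA, getD_const_fold, if_pos hk,
        hFB, getD_alt_fold,
        mergeAdd_eq_getD db.items (by simpa using hndb) k]
    have hitems : PySem.Dict.mk db.items = db := rfl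
    rw [hitems, hvA]
    by_cases hb : db.contains k = true
    · by_cases ha : da.contains k = true
      · simp [ha, hb]
      · rw [PySem.Dict.getD_of_not_contains da 0 (by simpa using ha)]
        simp [ha, hb]
    · rw [PySem.Dict.getD_of_not_contains db 0 (by simpa using hb)]
      by_cases ha : da.contains k = true
      · simp [ha, hb]
      · exfalso
        rcases hmem with h | h
        · exact ha ((PySem.Dict.contains_iff_mem_keys da k).mpr h)
        · exact hb ((PySem.Dict.contains_iff_mem_keys db k).mpr h)
  rw [PySem.Dict.items_eq_map_keys FA hkAnd 0, PySem.Dict.items_eq_map_keys FB hkBnd 0,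
      hkA, hkB]
  exact List.map_congr_left (fun k hk => by rw [hval k hk])

-- ===== VERDICT (by name: the statement is the Claim_ definition above) =====
theorem combine_constant_histograms_spec : Claim_equal_combine_constant_histograms := by
  intro part_a part_b _
  unfold Spec_combine_constant_histograms
  exact combine_constant_histograms_eq_alt part_a part_b
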